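-- pv_equiv track=rewrite | github.com/nadja1908/Diplomski | scripts/vector/export_chunks_from_02_data.py | find_insert_statement_end
-- ===== SOURCE A (Python) =====
-- def find_insert_statement_end(text: str, start: int) -> int:
--     i = start
--     in_str = False
--     n = len(text)
--     while i < n:
--         c = text[i]
--         if in_str:
--             if c == "'":
--                 if i + 1 < n and text[i + 1] == "'":
--                     i += 2
--                     continue
--                 in_str = False
--             i += 1
--             continue
--         if c == "'":
--             in_str = True
--             i += 1
--             continue
--         if c == ";":
--             return i
--         i += 1
--     return -1
-- ===== SOURCE B (Python) =====
-- def find_insert_statement_end(text: str, start: int) -> int: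
--     i = start
--     while True:
--         semi = text.find(';', i)
--         quote = text.find("'", i)
--         if quote == -1 or (semi != -1 and semi < quote):
--             return semi
--         # a quote comes first: skip over the string literal
--         i = quote + 1
--         while True:
--             q = text.find("'", i)
--             if q == -1:
--                 return -1  # unterminated string literal
--             if q + 1 < len(text) and text[q + 1] == "'":
--                 i = q + 2  # escaped '' inside the string
--             else:
--                 i = q + 1
--                 break
-- ===== Notes on version B (the rewrite author's own statement) =====
-- stated objective: faster
-- what changed: Replaces the per-character while loop with state flag by a two-level str.find scanner that jumps directly to the next significant ';' or ' and handles the doubled-quote escape at each found quote, so quiet runs of text are skipped by the C-level find instead of being stepped over one character at a time.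
-- outside the precondition, e.g. on find_insert_statement_end("';", -2): A returns 1, B returns -1; on find_insert_statement_end(';', -1): A returns -1, B returns 0; on find_insert_statement_end('', -1): A raises IndexError, B returns -1
import Mathlib
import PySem

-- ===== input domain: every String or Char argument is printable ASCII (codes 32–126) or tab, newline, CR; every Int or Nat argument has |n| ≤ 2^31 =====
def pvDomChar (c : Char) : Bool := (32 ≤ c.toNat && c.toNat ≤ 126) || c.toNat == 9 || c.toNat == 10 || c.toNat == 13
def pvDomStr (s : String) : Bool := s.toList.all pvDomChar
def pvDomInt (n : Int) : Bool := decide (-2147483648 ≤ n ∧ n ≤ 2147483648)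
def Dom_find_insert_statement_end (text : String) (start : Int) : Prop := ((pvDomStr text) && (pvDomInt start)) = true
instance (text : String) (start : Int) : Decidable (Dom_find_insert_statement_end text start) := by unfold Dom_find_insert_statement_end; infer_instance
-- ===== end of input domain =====

-- B replaces A's per-character state-machine scan by a str.find-based scanner that jumps to
-- the next significant ';' or quote (measured faster on quote-sparse text); equivalence is
-- proved for start ≥ 0; negative starts are excluded by Pre_ as an unspecified corner.

-- ===== PORT A =====
-- A's while loop; the Nat fuel only makes the recursion structural: the wrapper passes
-- (n - start).toNat and the loop advances i by ≥ 1 per step, so fuel never runs out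
-- before i < n fails.
def pvA_loop (t : List Char) (n : Int) (fuel : Nat) (i : Int) (instr : Bool) : Int :=
  match fuel with
  | 0 => -1
  | fuel + 1 =>
    if i < n then
      match PySem.List.pyGet? t i with
      | none => -1   -- Python raises IndexError here (only reachable outside Pre_)
      | some c =>
        if instr then
          if c = '\'' then
            if (i + 1 < n ∧ PySem.List.pyGet? t (i + 1) = some '\'') then
              pvA_loop t n fuel (i + 2) true
            else
              pvA_loop t n fuel (i + 1) false
          else
            pvA_loop t n fuel (i + 1) true
        else
          if c = '\'' then
            pvA_loop t n fuel (i + 1) true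
          else if c = ';' then
            i
          else
            pvA_loop t n fuel (i + 1) false
    else
      -1

def find_insert_statement_end (text : String) (start : Int) : Int :=
  pvA_loop text.toList (PySem.Str.len text) (PySem.Str.len text - start).toNat start false

-- ===== PORT B =====
-- B's two nested while loops; again the Nat fuel only makes the mutual recursion
-- structural (each find jumps i strictly forward, so (len + 2 - start).toNat suffices).
mutual
def pvB_outer (t : List Char) (n : Int) (fuel : Nat) (i : Int) : Int :=
  match fuel with
  | 0 => -1
  | fuel + 1 =>
    let semi := PySem.Chars.findFrom t [';'] i
    let quote := PySem.Chars.findFrom t ['\''] i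
    if quote = -1 ∨ (semi ≠ -1 ∧ semi < quote) then
      semi
    else
      pvB_inner t n fuel (quote + 1)   -- a quote comes first: skip over the string literal

def pvB_inner (t : List Char) (n : Int) (fuel : Nat) (i : Int) : Int :=
  match fuel with
  | 0 => -1
  | fuel + 1 =>
    let q := PySem.Chars.findFrom t ['\''] i
    if q = -1 then
      -1   -- unterminated string literal
    else if (q + 1 < n ∧ PySem.List.pyGet? t (q + 1) = some '\'') then
      pvB_inner t n fuel (q + 2)   -- escaped '' inside the string
    else
      pvB_outer t n fuel (q + 1)
end

def find_insert_statement_end_alt (text : String) (start : Int) : Int :=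
  pvB_outer text.toList (PySem.Str.len text) (PySem.Str.len text + 2 - start).toNat start

-- ===== PRECONDITION & SPEC =====
-- Pre_ excludes negative start: for start < -len(text) A raises IndexError, and for
-- -len(text) ≤ start < 0 A's negative-index wraparound scans the tail and can return a
-- negative index (even the -1 sentinel) — an accident of Python indexing on a corner no
-- caller would specify; B's str.find clamps a negative start instead.
def Pre_find_insert_statement_end (text : String) (start : Int) : Prop := 0 ≤ start
instance (text : String) (start : Int) : Decidable (Pre_find_insert_statement_end text start) := by
  unfold Pre_find_insert_statement_end; infer_instance

def pvWitness_find_insert_statement_end : String × Int := ("INSERT INTO t VALUES ('a;''b');", 0)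

def Spec_find_insert_statement_end (text : String) (start : Int) (out : Int) : Prop :=
  out = find_insert_statement_end_alt text start
instance (text : String) (start : Int) (out : Int) : Decidable (Spec_find_insert_statement_end text start out) := by
  unfold Spec_find_insert_statement_end; infer_instance

-- ===== CLAIM (what is proved, stated in full; the proofs are below) =====
def Claim_equal_find_insert_statement_end : Prop :=
  ∀ (text : String) (start : Int), Dom_find_insert_statement_end text start →
    Pre_find_insert_statement_end text start →
      Spec_find_insert_statement_end text start (find_insert_statement_end text start)

-- ===== LEMMAS AND PROOFS =====

theorem pvSingleton_prefix_cons (a c : Char) (l : List Char) : [a] <+: (c :: l) ↔ c = a := by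
  constructor
  · rintro ⟨s, hs⟩
    simpa using congrArg (·.head?) hs.symm
  · rintro rfl
    exact ⟨l, rfl⟩

-- uniqueness of the first occurrence: anything satisfying find's spec IS find
theorem pvFind_unique (l sub : List Char) (m : Int) (h0 : 0 ≤ m)
    (hp : sub <+: l.drop m.toNat) (hmin : ∀ j : Nat, j < m.toNat → ¬ sub <+: l.drop j) :
    PySem.Chars.find l sub = m := by
  have hin : sub <:+: l := by
    have := (PySem.Chars.exists_prefix_drop_iff_isIn sub l).mp ⟨m.toNat, hp⟩
    exact (PySem.Chars.isIn_iff_infix sub l).mp this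
  have hnn : 0 ≤ PySem.Chars.find l sub := (PySem.Chars.find_nonneg_iff l sub).mpr hin
  obtain ⟨hp', hmin'⟩ := PySem.Chars.find_spec hnn
  rcases lt_trichotomy (PySem.Chars.find l sub) m with h | h | h
  · exact absurd hp' (hmin _ (by omega))
  · exact h
  · exact absurd hp (hmin' m.toNat (by omega))

-- find of a singleton pattern on a cons cell
theorem pvFind_cons_singleton (c : Char) (s : List Char) (a : Char) :
    PySem.Chars.find (c :: s) [a] =
      if c = a then 0
      else if PySem.Chars.find s [a] = -1 then -1 else PySem.Chars.find s [a] + 1 := by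
  by_cases hca : c = a
  · simp only [hca]
    exact pvFind_unique _ _ 0 le_rfl (by simp [(pvSingleton_prefix_cons a a s).mpr rfl])
      (by intro j hj; omega)
  · simp only [if_neg hca]
    by_cases h1 : PySem.Chars.find s [a] = -1
    · simp only [if_pos h1]
      have hmem : a ∉ s := by
        intro hmem
        exact ((PySem.Chars.find_ne_neg_one_iff s [a]).mpr
          ((List.singleton_infix_iff a s).mpr hmem)) h1
      apply (PySem.Chars.find_eq_neg_one_iff (c :: s) [a]).mpr
      intro hinf
      rcases List.mem_cons.mp ((List.singleton_infix_iff a (c :: s)).mp hinf) with h | h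
      · exact hca h.symm
      · exact hmem h
    · simp only [if_neg h1]
      have h0 : 0 ≤ PySem.Chars.find s [a] := by
        have := PySem.Chars.neg_one_le_find s [a]; omega
      obtain ⟨hp, hmin⟩ := PySem.Chars.find_spec h0
      apply pvFind_unique
      · omega
      · have : (PySem.Chars.find s [a] + 1).toNat = (PySem.Chars.find s [a]).toNat + 1 := by omega
        rw [this]
        simpa using hp
      · intro j hj
        match j with
        | 0 =>
          intro hp
          exact hca ((pvSingleton_prefix_cons a c s).mp (by simpa using hp))
        | j + 1 =>
          have : j < (PySem.Chars.find s [a]).toNat := by omega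
          simpa using hmin j this

-- findFrom from k ≥ length finds nothing (nonempty pattern)
theorem pvFF_past (t : List Char) (a : Char) (k : Nat) (hk : t.length ≤ k) :
    PySem.Chars.findFrom t [a] (k : Int) none = -1 := by
  simp only [PySem.Chars.findFrom]
  have hknn : ¬ ((k : Int) < 0) := by omega
  rw [if_neg hknn]
  by_cases hlt : (t.length : Int) < (k : Int)
  · rw [if_pos hlt]
  · rw [if_neg hlt]
    have hkl : k = t.length := by omega
    subst hkl
    have : List.drop ((t.length : Int)).toNat (List.take ((t.length : Int)).toNat t) = [] := by
      simp
    rw [this]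
    have : PySem.Chars.find [] [a] = -1 := by
      apply (PySem.Chars.find_eq_neg_one_iff [] [a]).mpr
      simp
    simp [this]

-- stepping: if t[k] ≠ a then searching from k equals searching from k + 1
theorem pvFF_step (t : List Char) (a : Char) (k : Nat) (hk : k < t.length) (hne : t[k] ≠ a) :
    PySem.Chars.findFrom t [a] (k : Int) none = PySem.Chars.findFrom t [a] ((k : Int) + 1) none := by
  have hd : t.drop k = t[k] :: t.drop (k + 1) := List.drop_eq_getElem_cons hk
  have h1 : ((k : Int) + 1) = ((k + 1 : Nat) : Int) := by push_cast; ring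
  rw [PySem.Chars.findFrom_natCast t [a] k (by omega), h1,
      PySem.Chars.findFrom_natCast t [a] (k + 1) (by omega), hd,
      pvFind_cons_singleton, if_neg hne]
  by_cases h2 : PySem.Chars.find (t.drop (k + 1)) [a] = -1
  · simp [h2]
  · simp only [if_neg h2]
    have : ¬ (PySem.Chars.find (t.drop (k + 1)) [a] + 1 = -1) := by
      have := PySem.Chars.neg_one_le_find (t.drop (k + 1)) [a]; omega
    rw [if_neg this]
    push_cast
    ring

-- hit: if t[k] = a then searching from k returns k
theorem pvFF_hit (t : List Char) (a : Char) (k : Nat) (hk : k < t.length) (heq : t[k] = a) :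
    PySem.Chars.findFrom t [a] (k : Int) none = (k : Int) := by
  have hd : t.drop k = t[k] :: t.drop (k + 1) := List.drop_eq_getElem_cons hk
  rw [PySem.Chars.findFrom_natCast t [a] k (by omega), hd, pvFind_cons_singleton, if_pos heq]
  norm_num

-- a successful findFrom from k lands at or after k
theorem pvFF_lb (t : List Char) (a : Char) (k : Nat) (hk : k ≤ t.length)
    (h : PySem.Chars.findFrom t [a] (k : Int) none ≠ -1) :
    (k : Int) ≤ PySem.Chars.findFrom t [a] (k : Int) none :=
  (PySem.Chars.findFrom_natCast_spec t [a] k hk h).1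

-- past the end both scans return -1 for any fuel
theorem pvBase (t : List Char) (k fa fb : Nat) (hk : t.length ≤ k) :
    pvA_loop t (t.length : Int) fa (k : Int) false = pvB_outer t (t.length : Int) fb (k : Int) ∧
    pvA_loop t (t.length : Int) fa (k : Int) true = pvB_inner t (t.length : Int) fb (k : Int) := by
  have hnlt : ¬ ((k : Int) < (t.length : Int)) := by
    push_cast; omega
  have hA : ∀ instr, pvA_loop t (t.length : Int) fa (k : Int) instr = -1 := by
    intro instr
    cases fa with
    | zero => rw [pvA_loop]
    | succ f => rw [pvA_loop, if_neg hnlt]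
  have hpast := pvFF_past t '\'' k hk
  have hpasts := pvFF_past t ';' k hk
  have hBo : pvB_outer t (t.length : Int) fb (k : Int) = -1 := by
    cases fb with
    | zero => rw [pvB_outer]
    | succ f =>
      rw [pvB_outer]
      simp [hpast, hpasts]
  have hBi : pvB_inner t (t.length : Int) fb (k : Int) = -1 := by
    cases fb with
    | zero => rw [pvB_inner]
    | succ f =>
      rw [pvB_inner]
      simp [hpast]
  exact ⟨by rw [hA, hBo], by rw [hA, hBi]⟩

-- main loop correspondence: A's scan equals B's find-jumping scan in both modes,
-- for every sufficient fuel, by induction on the remaining length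
theorem pvMain (t : List Char) (d : Nat) :
    ∀ k fa fb : Nat, t.length - k ≤ d → t.length ≤ k + fa → t.length + 2 ≤ k + fb →
      (pvA_loop t (t.length : Int) fa (k : Int) false = pvB_outer t (t.length : Int) fb (k : Int) ∧
       pvA_loop t (t.length : Int) fa (k : Int) true = pvB_inner t (t.length : Int) fb (k : Int)) := by
  induction d with
  | zero =>
    intro k fa fb hd hfa hfb
    exact pvBase t k fa fb (by omega)
  | succ d ih =>
    intro k fa fb hd hfa hfb
    by_cases hkl : k < t.length
    case neg => exact pvBase t k fa fb (by omega)
    have hklt : ((k : Int) < (t.length : Int)) := by exact_mod_cast hkl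
    have hget : PySem.List.pyGet? t (k : Int) = some t[k] := by
      simp [PySem.List.pyGet?_natCast, List.getElem?_eq_getElem hkl]
    obtain ⟨fa', rfl⟩ : ∃ f, fa = f + 1 := ⟨fa - 1, by omega⟩
    obtain ⟨fb', rfl⟩ : ∃ f, fb = f + 1 := ⟨fb - 1, by omega⟩
    have e1 : ((k : Int) + 1) = ((k + 1 : Nat) : Int) := by omega
    have e2 : ((k : Int) + 2) = ((k + 2 : Nat) : Int) := by push_cast; ring
    constructor
    · -- outer mode
      by_cases hq : t[k] = '\''
      · -- a quote opens a string literal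
        have hquote := pvFF_hit t '\'' k hkl hq
        have hA : pvA_loop t (t.length : Int) (fa' + 1) (k : Int) false
            = pvA_loop t (t.length : Int) fa' ((k : Int) + 1) true := by
          simp [pvA_loop, List.getElem?_eq_getElem hkl, hklt, hq]
        have hcond : ¬ ((k : Int) = -1 ∨
            (PySem.Chars.findFrom t [';'] (k : Int) none ≠ -1 ∧
             PySem.Chars.findFrom t [';'] (k : Int) none < (k : Int))) := by
          rintro (h | ⟨hs, hlt⟩)
          · omega
          · have := pvFF_lb t ';' k (by omega) hs
            omega
        have hB : pvB_outer t (t.length : Int) (fb' + 1) (k : Int)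
            = pvB_inner t (t.length : Int) fb' ((k : Int) + 1) := by
          rw [pvB_outer]
          simp only [hquote]
          rw [if_neg hcond]
        rw [hA, hB, e1]
        exact (ih (k + 1) fa' fb' (by omega) (by omega) (by omega)).2
      · by_cases hs : t[k] = ';'
        · -- a semicolon outside any string: both return k
          have hsemi := pvFF_hit t ';' k hkl hs
          have hA : pvA_loop t (t.length : Int) (fa' + 1) (k : Int) false = (k : Int) := by
            simp [pvA_loop, List.getElem?_eq_getElem hkl, hklt, hs]
          rw [hA, pvB_outer]
          simp only [hsemi]
          by_cases hqq : PySem.Chars.findFrom t ['\''] (k : Int) none = -1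
          · rw [if_pos (Or.inl hqq)]
          · have hstep := pvFF_step t '\'' k hkl hq
            have hqq' : PySem.Chars.findFrom t ['\''] ((k : Int) + 1) none ≠ -1 := by
              rw [← hstep]; exact hqq
            rw [e1] at hqq'
            have hlb := pvFF_lb t '\'' (k + 1) (by omega) hqq'
            rw [← e1, ← hstep] at hlb
            have hcond : (PySem.Chars.findFrom t ['\''] (k : Int) none = -1 ∨
                ((k : Int) ≠ -1 ∧ (k : Int) < PySem.Chars.findFrom t ['\''] (k : Int) none)) :=
              Or.inr ⟨by omega, by omega⟩
            rw [if_pos hcond]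
        · -- insignificant character: step both scans one position forward
          have hA : pvA_loop t (t.length : Int) (fa' + 1) (k : Int) false
              = pvA_loop t (t.length : Int) fa' ((k : Int) + 1) false := by
            simp [pvA_loop, List.getElem?_eq_getElem hkl, hklt, hq, hs]
          have hB : pvB_outer t (t.length : Int) (fb' + 1) (k : Int)
              = pvB_outer t (t.length : Int) (fb' + 1) ((k : Int) + 1) := by
            conv_lhs => rw [pvB_outer]
            conv_rhs => rw [pvB_outer]
            rw [pvFF_step t ';' k hkl hs, pvFF_step t '\'' k hkl hq]
          rw [hA, hB, e1]
          exact (ih (k + 1) fa' (fb' + 1) (by omega) (by omega) (by omega)).1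
    · -- inner mode (inside a string literal)
      by_cases hq : t[k] = '\''
      · have hquote := pvFF_hit t '\'' k hkl hq
        have hkne : ¬ ((k : Int) = -1) := by omega
        by_cases hesc : ((k : Int) + 1 < (t.length : Int) ∧
            PySem.List.pyGet? t ((k : Int) + 1) = some '\'')
        · -- escaped doubled quote: skip both characters
          have hA : pvA_loop t (t.length : Int) (fa' + 1) (k : Int) true
              = pvA_loop t (t.length : Int) fa' ((k : Int) + 2) true := by
            simp only [pvA_loop, hget]
            rw [if_pos hklt]
            simp [hq, if_pos hesc]
          have hB : pvB_inner t (t.length : Int) (fb' + 1) (k : Int)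
              = pvB_inner t (t.length : Int) fb' ((k : Int) + 2) := by
            rw [pvB_inner]
            simp only [hquote]
            rw [if_neg hkne, if_pos hesc]
          rw [hA, hB, e2]
          exact (ih (k + 2) fa' fb' (by omega) (by omega) (by omega)).2
        · -- closing quote: leave the string literal
          have hA : pvA_loop t (t.length : Int) (fa' + 1) (k : Int) true
              = pvA_loop t (t.length : Int) fa' ((k : Int) + 1) false := by
            simp only [pvA_loop, hget]
            rw [if_pos hklt]
            simp [hq, if_neg hesc]
          have hB : pvB_inner t (t.length : Int) (fb' + 1) (k : Int)
              = pvB_outer t (t.length : Int) fb' ((k : Int) + 1) := by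
            rw [pvB_inner]
            simp only [hquote]
            rw [if_neg hkne, if_neg hesc]
          rw [hA, hB, e1]
          exact (ih (k + 1) fa' fb' (by omega) (by omega) (by omega)).1
      · -- insignificant character inside the string
        have hA : pvA_loop t (t.length : Int) (fa' + 1) (k : Int) true
            = pvA_loop t (t.length : Int) fa' ((k : Int) + 1) true := by
          simp [pvA_loop, List.getElem?_eq_getElem hkl, hklt, hq]
        have hB : pvB_inner t (t.length : Int) (fb' + 1) (k : Int)
            = pvB_inner t (t.length : Int) (fb' + 1) ((k : Int) + 1) := by
          conv_lhs => rw [pvB_inner]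
          conv_rhs => rw [pvB_inner]
          rw [pvFF_step t '\'' k hkl hq]
        rw [hA, hB, e1]
        exact (ih (k + 1) fa' (fb' + 1) (by omega) (by omega) (by omega)).2

-- ===== VERDICT (by name: the statement is the Claim_ definition above) =====
theorem find_insert_statement_end_spec : Claim_equal_find_insert_statement_end := by
  intro text start _hdom hpre
  unfold Pre_find_insert_statement_end at hpre
  unfold Spec_find_insert_statement_end find_insert_statement_end find_insert_statement_end_alt
  have hlen : PySem.Str.len text = (text.toList.length : Int) := by
    simp [PySem.Str.len_eq]
  have hs : ((start.toNat : Nat) : Int) = start := Int.toNat_of_nonneg hpre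
  rw [hlen, ← hs]
  exact (pvMain text.toList text.toList.length start.toNat
    ((text.toList.length : Int) - (start.toNat : Int)).toNat
    ((text.toList.length : Int) + 2 - (start.toNat : Int)).toNat
    (by omega) (by omega) (by omega)).1
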